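-- pv_equiv track=rewrite | github.com/zzz0105/BAEKJOON | 프로그래머스/lv1/131128. 숫자 짝꿍/숫자 짝꿍.py | solution
-- ===== SOURCE A (Python) =====
-- from collections import Counter
--
-- def solution(X, Y):
--     answer = ''
--     x, y = Counter(X), Counter(Y)
--     for num in sorted(x.keys(), reverse=True):
--         if num in y.keys():
--             answer += num*min(x[num], y[num])
--     if answer: return "0" if answer[0]=="0" else answer
--     else:   return "-1"
-- ===== SOURCE B (Python) =====
-- def solution(X, Y):
--     xs = sorted(X)
--     ys = sorted(Y)
--     i = j = 0
--     common = []
--     while i < len(xs) and j < len(ys):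
--         if xs[i] == ys[j]:
--             common.append(xs[i])
--             i += 1
--             j += 1
--         elif xs[i] < ys[j]:
--             i += 1
--         else:
--             j += 1
--     if not common:
--         return '-1'
--     if common[-1] == '0':
--         return '0'
--     return ''.join(reversed(common))
-- ===== Notes on version B (the rewrite author's own statement) =====
-- stated objective: alternative
-- what changed: Replaces A's Counter dicts plus a descending scan over sorted distinct keys by sorting both strings and running a two-pointer merge that collects the common character multiset, then reversing it.
import Mathlib
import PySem

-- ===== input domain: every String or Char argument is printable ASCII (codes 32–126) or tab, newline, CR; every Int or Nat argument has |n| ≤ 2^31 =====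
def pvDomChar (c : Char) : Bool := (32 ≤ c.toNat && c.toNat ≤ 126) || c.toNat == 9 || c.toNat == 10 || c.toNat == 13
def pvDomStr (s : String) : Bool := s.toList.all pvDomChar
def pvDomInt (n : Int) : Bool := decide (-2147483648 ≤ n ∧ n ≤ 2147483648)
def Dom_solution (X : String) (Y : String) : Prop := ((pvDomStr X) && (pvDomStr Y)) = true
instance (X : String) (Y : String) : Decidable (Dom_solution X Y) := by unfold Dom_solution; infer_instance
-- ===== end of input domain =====

-- B replaces A's Counter plus descending key scan by a two-pointer merge of the two
-- ascending-sorted character lists (objective: alternative algorithm, similar cost).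

-- ===== PORT A =====
def solution (X : String) (Y : String) : String :=
  let x := PySem.Dict.counter X.toList
  let y := PySem.Dict.counter Y.toList
  let answer : List Char :=
    (PySem.List.sorted x.keys (fun c => c) true).foldl
      (fun acc num =>
        if y.contains num then
          acc ++ PySem.List.pyRepeat [num] (min (x.getD num 0) (y.getD num 0))
        else acc) []
  if answer ≠ [] then
    (if PySem.List.pyGet? answer 0 = some '0' then "0" else String.ofList answer)
  else "-1"

-- ===== PORT B =====
-- the while loop of Source B: two pointers over the two sorted lists, collecting equal heads
def mergeCommon : List Char → List Char → List Char
  | [], _ => []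
  | _ :: _, [] => []
  | a :: as, b :: bs =>
    if a = b then a :: mergeCommon as bs
    else if a < b then mergeCommon as (b :: bs)
    else mergeCommon (a :: as) bs

def solution_alt (X : String) (Y : String) : String :=
  let xs := PySem.List.sorted X.toList (fun c => c) false
  let ys := PySem.List.sorted Y.toList (fun c => c) false
  let common := mergeCommon xs ys
  if common = [] then "-1"
  else if PySem.List.pyGet? common (-1) = some '0' then "0"
  else String.ofList common.reverse

-- ===== PRECONDITION & SPEC =====
def Spec_solution (X : String) (Y : String) (out : String) : Prop := out = solution_alt X Y
instance (X : String) (Y : String) (out : String) : Decidable (Spec_solution X Y out) := by unfold Spec_solution; infer_instance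

-- ===== CLAIM (what is proved, stated in full; the proofs are below) =====
def Claim_equal_solution : Prop := ∀ (X : String) (Y : String), Dom_solution X Y → Spec_solution X Y (solution X Y)

-- ===== LEMMAS AND PROOFS =====

theorem mergeCommon_cons_eq (b : Char) (as bs : List Char) :
    mergeCommon (b :: as) (b :: bs) = b :: mergeCommon as bs := by
  simp [mergeCommon]

-- every element of the merge comes from the left list
theorem mem_mergeCommon_left {as bs : List Char} {x : Char}
    (h : x ∈ mergeCommon as bs) : x ∈ as := by
  induction as, bs using mergeCommon.induct with
  | case1 bs => simp [mergeCommon] at h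
  | case2 a as => simp [mergeCommon] at h
  | case3 as b bs ih =>
    rw [mergeCommon_cons_eq] at h
    rcases List.mem_cons.mp h with h | h
    · simp [h]
    · exact List.mem_cons_of_mem _ (ih h)
  | case4 a as b bs hne hlt ih =>
    simp only [mergeCommon, if_neg hne, if_pos hlt] at h
    exact List.mem_cons_of_mem _ (ih h)
  | case5 a as b bs hne hlt ih =>
    simp only [mergeCommon, if_neg hne, if_neg hlt] at h
    exact ih h

-- the merge of two ascending lists is ascending
theorem pairwise_mergeCommon (as bs : List Char) :
    as.Pairwise (· ≤ ·) → bs.Pairwise (· ≤ ·) →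
    (mergeCommon as bs).Pairwise (· ≤ ·) := by
  induction as, bs using mergeCommon.induct with
  | case1 bs => intro _ _; simp [mergeCommon]
  | case2 a as => intro _ _; simp [mergeCommon]
  | case3 as b bs ih =>
    intro ha hb
    rw [mergeCommon_cons_eq]
    refine List.pairwise_cons.mpr ⟨?_, ih (List.Pairwise.of_cons ha) (List.Pairwise.of_cons hb)⟩
    intro x hx
    exact (List.pairwise_cons.mp ha).1 x (mem_mergeCommon_left hx)
  | case4 a as b bs hne hlt ih =>
    intro ha hb
    simp only [mergeCommon, if_neg hne, if_pos hlt]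
    exact ih (List.Pairwise.of_cons ha) hb
  | case5 a as b bs hne hlt ih =>
    intro ha hb
    simp only [mergeCommon, if_neg hne, if_neg hlt]
    exact ih ha (List.Pairwise.of_cons hb)

-- per-character count of the merge of two ascending lists is the min of the counts
theorem count_mergeCommon (as bs : List Char) :
    as.Pairwise (· ≤ ·) → bs.Pairwise (· ≤ ·) →
    ∀ c : Char, (mergeCommon as bs).count c = min (as.count c) (bs.count c) := by
  induction as, bs using mergeCommon.induct with
  | case1 bs => intro _ _ c; simp [mergeCommon]
  | case2 a as => intro _ _ c; simp [mergeCommon]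
  | case3 as b bs ih =>
    intro ha hb c
    have h := ih (List.Pairwise.of_cons ha) (List.Pairwise.of_cons hb) c
    rw [mergeCommon_cons_eq]
    by_cases hbc : b = c
    · simp [hbc, h]
    · simp [hbc, h]
  | case4 a as b bs hne hlt ih =>
    intro ha hb c
    have h := ih (List.Pairwise.of_cons ha) hb c
    simp only [mergeCommon, if_neg hne, if_pos hlt, h]
    by_cases hac : a = c
    · subst hac
      have h0 : (b :: bs).count a = 0 := by
        refine List.count_eq_zero.mpr ?_
        intro hmem
        rcases List.mem_cons.mp hmem with h1 | h1
        · exact hne h1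
        · exact absurd ((List.pairwise_cons.mp hb).1 a h1) (not_le.mpr hlt)
      simp only [List.count_cons] at h0 ⊢
      omega
    · simp [List.count_cons, hac]
  | case5 a as b bs hne hlt ih =>
    intro ha hb c
    have h := ih ha (List.Pairwise.of_cons hb) c
    simp only [mergeCommon, if_neg hne, if_neg hlt, h]
    by_cases hbc : b = c
    · subst hbc
      have hba : b < a := lt_of_le_of_ne (not_lt.mp hlt) (fun e => hne e.symm)
      have h0 : (a :: as).count b = 0 := by
        refine List.count_eq_zero.mpr ?_
        intro hmem
        rcases List.mem_cons.mp hmem with h1 | h1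
        · exact hne h1.symm
        · exact absurd ((List.pairwise_cons.mp ha).1 b h1) (not_le.mpr hba)
      simp only [List.count_cons] at h0 ⊢
      omega
    · simp [List.count_cons, hbc]

-- counting inside a flatMap whose blocks are constant: only the block of c contributes
theorem count_flatMap_const (l : List Char) (g : Char → List Char)
    (hg : ∀ k x, x ∈ g k → x = k) (hnd : l.Nodup) (c : Char) :
    (l.flatMap g).count c = if c ∈ l then (g c).length else 0 := by
  induction l with
  | nil => simp
  | cons k l ih =>
    have hnd' := List.nodup_cons.mp hnd
    simp only [List.flatMap_cons, List.count_append, ih hnd'.2]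
    by_cases hck : c = k
    · subst hck
      have h1 : (g c).count c = (g c).length :=
        List.count_eq_length.mpr (fun x hx => ((hg c x hx) ▸ rfl))
      simp [h1, hnd'.1]
    · have h1 : (g k).count c = 0 :=
        List.count_eq_zero.mpr (fun hmem => hck (hg k c hmem))
      simp [h1, hck]

-- a flatMap of constant blocks over a strictly descending list is descending
theorem pairwise_flatMap_desc (l : List Char) (g : Char → List Char)
    (hg : ∀ k x, x ∈ g k → x = k) (hl : l.Pairwise (fun a b => b < a)) :
    (l.flatMap g).Pairwise (fun a b => b ≤ a) := by
  induction l with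
  | nil => simp
  | cons k l ih =>
    have hl' := List.pairwise_cons.mp hl
    simp only [List.flatMap_cons]
    refine List.pairwise_append.mpr ⟨?_, ih hl'.2, ?_⟩
    · refine List.pairwise_iff_forall_sublist.mpr ?_
      intro a b hsub
      have ha := hg k a (hsub.subset (by simp))
      have hb := hg k b (hsub.subset (by simp))
      simp [ha, hb]
    · intro a ha b hb
      have hak := hg k a ha
      rcases List.mem_flatMap.mp hb with ⟨k', hk', hbk'⟩
      have hbk := hg k' b hbk'
      subst hak hbk
      exact le_of_lt (hl'.1 b hk')

-- the core fact: A's loop over descending Counter keys builds exactly the reversed merge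
theorem answer_eq_rev_merge (xs ys : List Char) :
    (PySem.List.sorted (PySem.Dict.counter xs).keys (fun c => c) true).foldl
      (fun acc num =>
        if (PySem.Dict.counter ys).contains num then
          acc ++ PySem.List.pyRepeat [num]
            (min ((PySem.Dict.counter xs).getD num 0) ((PySem.Dict.counter ys).getD num 0))
        else acc) []
    = (mergeCommon (PySem.List.sorted xs (fun c => c) false)
        (PySem.List.sorted ys (fun c => c) false)).reverse := by
  set sx := PySem.List.sorted xs (fun c => c) false with hsx
  set sy := PySem.List.sorted ys (fun c => c) false with hsy
  set common := mergeCommon sx sy with hcommon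
  set g : Char → List Char := fun num =>
    if (PySem.Dict.counter ys).contains num then
      PySem.List.pyRepeat [num] (min ((PySem.Dict.counter xs).getD num 0) ((PySem.Dict.counter ys).getD num 0))
    else [] with hg
  have hgconst : ∀ k x, x ∈ g k → x = k := by
    intro k x hx
    simp only [hg] at hx
    split at hx
    · rw [PySem.List.pyRepeat_singleton] at hx
      exact (List.eq_of_mem_replicate hx)
    · simp at hx
  set keysD := PySem.List.sorted (PySem.Dict.counter xs).keys (fun c => c) true with hkeysD
  have hfold :
      keysD.foldl (fun acc num =>
        if (PySem.Dict.counter ys).contains num then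
          acc ++ PySem.List.pyRepeat [num] (min ((PySem.Dict.counter xs).getD num 0) ((PySem.Dict.counter ys).getD num 0))
        else acc) [] = keysD.flatMap g := by
    have h1 :
        keysD.foldl (fun acc num =>
          if (PySem.Dict.counter ys).contains num then
            acc ++ PySem.List.pyRepeat [num] (min ((PySem.Dict.counter xs).getD num 0) ((PySem.Dict.counter ys).getD num 0))
          else acc) [] = keysD.foldl (fun acc num => acc ++ g num) [] := by
      apply PySem.List.foldl_congr_mem
      intro acc num _
      simp only [hg]
      split <;> simp
    rw [h1, PySem.List.foldl_append_eq_flatMap]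
    simp
  rw [hfold]
  set answer := keysD.flatMap g with hanswer
  -- keysD: a strictly descending enumeration of the distinct characters of xs
  have hkperm : keysD.Perm (PySem.Set.ofList xs) := by
    rw [hkeysD, PySem.Dict.keys_counter]
    exact PySem.List.sorted_perm _ _ _
  have hknd : keysD.Nodup := hkperm.nodup_iff.mpr (PySem.Set.nodup_ofList xs)
  have hkmem : ∀ c, c ∈ keysD ↔ c ∈ xs := by
    intro c
    rw [hkperm.mem_iff, PySem.Set.mem_ofList]
  have hkdesc : keysD.Pairwise (fun a b => b < a) := by
    have h1 : keysD.Pairwise (fun a b => b ≤ a) := PySem.List.sorted_pairwise_rev _ _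
    have h2 : keysD.Pairwise (fun a b => a ≠ b) := hknd
    exact (h1.and h2).imp (fun ⟨hle, hne⟩ => lt_of_le_of_ne hle (fun e => hne e.symm))
  -- per-character count of A's answer
  have hacount : ∀ c, answer.count c = min (xs.count c) (ys.count c) := by
    intro c
    rw [hanswer, count_flatMap_const keysD g hgconst hknd c]
    by_cases hcx : c ∈ xs
    · rw [if_pos ((hkmem c).mpr hcx)]
      simp only [hg]
      by_cases hcy : c ∈ ys
      · rw [if_pos (by simp [PySem.Dict.contains_counter, hcy])]
        rw [PySem.List.pyRepeat_singleton, List.length_replicate]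
        simp only [PySem.Dict.getD_counter]
        omega
      · have h0 : ys.count c = 0 := List.count_eq_zero.mpr hcy
        rw [if_neg (by simp [PySem.Dict.contains_counter, hcy])]
        simp [h0]
    · rw [if_neg (fun h => hcx ((hkmem c).mp h))]
      have h0 : xs.count c = 0 := List.count_eq_zero.mpr hcx
      simp [h0]
  -- A's answer is descending
  have hadesc : answer.Pairwise (fun a b => b ≤ a) :=
    pairwise_flatMap_desc keysD g hgconst hkdesc
  -- B's common list: ascending, with the same counts
  have hsxp : sx.Pairwise (· ≤ ·) := PySem.List.sorted_pairwise xs (fun c => c)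
  have hsyp : sy.Pairwise (· ≤ ·) := PySem.List.sorted_pairwise ys (fun c => c)
  have hccount : ∀ c, common.count c = min (xs.count c) (ys.count c) := by
    intro c
    rw [hcommon, count_mergeCommon sx sy hsxp hsyp c,
      (PySem.List.sorted_perm xs (fun c => c) false).count_eq,
      (PySem.List.sorted_perm ys (fun c => c) false).count_eq]
  have hcasc : common.Pairwise (· ≤ ·) := pairwise_mergeCommon sx sy hsxp hsyp
  -- two equally-counted lists sorted in the same order coincide
  have hperm : answer.reverse.Perm common :=
    List.perm_iff_count.mpr (by
      intro c
      rw [List.count_reverse, hacount c, hccount c])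
  have hrevasc : answer.reverse.Pairwise (fun a b => (fun c : Char => c) a ≤ (fun c : Char => c) b) := by
    simpa using List.pairwise_reverse.mpr hadesc
  have hcasc' : common.Pairwise (fun a b => (fun c : Char => c) a ≤ (fun c : Char => c) b) := by
    simpa using hcasc
  have hrc := PySem.List.eq_of_perm_of_pairwise_le_of_injective (fun c : Char => c)
    (fun a b h => h) hperm hrevasc hcasc'
  calc answer = answer.reverse.reverse := (List.reverse_reverse _).symm
    _ = common.reverse := by rw [hrc]

theorem solution_eq (X Y : String) : solution X Y = solution_alt X Y := by
  unfold solution solution_alt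
  simp only [answer_eq_rev_merge]
  set common := mergeCommon (PySem.List.sorted X.toList (fun c => c) false)
    (PySem.List.sorted Y.toList (fun c => c) false) with hcommon
  by_cases hc : common = []
  · simp [hc]
  · have h1 : PySem.List.pyGet? common.reverse 0 = PySem.List.pyGet? common (-1) := by
      rw [PySem.List.pyGet?_neg_one, PySem.List.pyGet?_zero, ← List.head?_reverse,
        List.head?_eq_getElem?]
    simp [hc, h1]

-- ===== VERDICT (by name: the statement is the Claim_ definition above) =====
theorem solution_spec : Claim_equal_solution := by
  intro X Y _
  exact solution_eq X Y
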